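-- pv_equiv track=rewrite | github.com/danielsantosfernandes/FP2P_1617 | Projeto2.py | e_chave
-- ===== SOURCE A (Python) =====
-- def e_chave(arg):
--     L=('A','B','C','D','E','F','G','H','I','K','L','M','N','O','P','Q','R','S','T','U','V','W','X','Y','Z')
--     letras=[]
--     if isinstance(arg, tuple) and len(arg)==5:
--         for l in arg:
--             if isinstance(l, tuple) and len(l)==5:
--                 for c in l:
--                     if isinstance(c, str) and c in L and c not in letras:
--                         letras=letras+[c]
--
--                     else:
--                         return False
--             else:
--                 return False
--         return True
--     else:
--         return False
-- ===== SOURCE B (Python) =====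
-- def e_chave(arg):
--     VALID = {'A','B','C','D','E','F','G','H','I','K','L','M','N','O','P',
--              'Q','R','S','T','U','V','W','X','Y','Z'}
--     if not (isinstance(arg, tuple) and len(arg) == 5):
--         return False
--     if not all(isinstance(row, tuple) and len(row) == 5 for row in arg):
--         return False
--     cells = [c for row in arg for c in row]
--     if not all(isinstance(c, str) and c in VALID for c in cells):
--         return False
--     return len(set(cells)) == 25
-- ===== Notes on version B (the rewrite author's own statement) =====
-- stated objective: simpler
-- what changed: A's single interleaved loop that accumulates seen letters and re-scans the accumulator per cell is replaced by separate passes: validate the shape, flatten the 25 cells, check validity with all() over a constant set, and check distinctness by len(set(cells)) == 25.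
import Mathlib
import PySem

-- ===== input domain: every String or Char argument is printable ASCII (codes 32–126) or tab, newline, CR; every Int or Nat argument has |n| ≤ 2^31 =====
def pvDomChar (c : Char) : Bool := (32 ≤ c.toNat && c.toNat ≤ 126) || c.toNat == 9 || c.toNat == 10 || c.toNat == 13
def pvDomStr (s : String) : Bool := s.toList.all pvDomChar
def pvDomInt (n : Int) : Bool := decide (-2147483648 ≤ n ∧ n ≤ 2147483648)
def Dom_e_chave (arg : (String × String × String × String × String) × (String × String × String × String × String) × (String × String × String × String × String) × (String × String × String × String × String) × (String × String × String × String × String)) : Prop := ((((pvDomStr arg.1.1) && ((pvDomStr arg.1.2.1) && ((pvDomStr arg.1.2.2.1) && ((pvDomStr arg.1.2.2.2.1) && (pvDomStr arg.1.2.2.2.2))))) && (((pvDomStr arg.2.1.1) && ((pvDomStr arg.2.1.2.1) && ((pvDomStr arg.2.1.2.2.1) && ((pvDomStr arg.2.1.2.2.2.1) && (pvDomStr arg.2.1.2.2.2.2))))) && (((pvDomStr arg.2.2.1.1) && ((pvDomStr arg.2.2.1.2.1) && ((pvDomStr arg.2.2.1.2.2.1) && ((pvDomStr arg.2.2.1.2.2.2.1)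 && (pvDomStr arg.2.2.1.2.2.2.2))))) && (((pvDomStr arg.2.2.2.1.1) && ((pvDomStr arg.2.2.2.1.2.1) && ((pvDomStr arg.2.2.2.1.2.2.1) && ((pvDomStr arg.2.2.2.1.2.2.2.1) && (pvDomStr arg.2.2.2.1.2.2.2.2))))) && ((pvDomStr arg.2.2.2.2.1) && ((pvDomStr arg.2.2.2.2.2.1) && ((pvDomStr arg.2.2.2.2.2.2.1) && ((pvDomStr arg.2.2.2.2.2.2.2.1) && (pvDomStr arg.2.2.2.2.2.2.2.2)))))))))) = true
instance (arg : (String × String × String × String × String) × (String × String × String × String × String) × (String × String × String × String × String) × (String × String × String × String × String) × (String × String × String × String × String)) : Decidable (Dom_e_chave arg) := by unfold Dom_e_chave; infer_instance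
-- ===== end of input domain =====

-- B replaces A's interleaved accumulate-and-rescan loop by separate passes: shape check, flatten, all-valid check, then len(set)==25 for distinctness; objective: simpler.
-- ===== PORT A =====
-- A's tuple L of valid letters ('J' excluded)
def pvLettersA : List String := ["A","B","C","D","E","F","G","H","I","K","L","M","N","O","P","Q","R","S","T","U","V","W","X","Y","Z"]

-- inner 'for c in l' loop: returns the grown letras, or none on the first 'return False'
-- (the isinstance checks of A are identically true under the declared type and are not branches here)
def pvRowLoop : List String → List String → Option (List String)
  | [], letras => some letras
  | c :: rest, letras =>
      if pvLettersA.contains c && !letras.contains c then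
        pvRowLoop rest (letras ++ [c])
      else
        none

-- outer 'for l in arg' loop threading letras; false on the first failed row
def pvGridLoop : List (List String) → List String → Bool
  | [], _ => true
  | r :: rs, letras =>
      match pvRowLoop r letras with
      | some letras' => pvGridLoop rs letras'
      | none => false

def e_chave (arg : (String × String × String × String × String) × (String × String × String × String × String) × (String × String × String × String × String) × (String × String × String × String × String) × (String × String × String × String × String)) : Bool :=
  let rows : List (List String) :=
    [[arg.1.1, arg.1.2.1, arg.1.2.2.1, arg.1.2.2.2.1, arg.1.2.2.2.2],
     [arg.2.1.1, arg.2.1.2.1, arg.2.1.2.2.1, arg.2.1.2.2.2.1, arg.2.1.2.2.2.2],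
     [arg.2.2.1.1, arg.2.2.1.2.1, arg.2.2.1.2.2.1, arg.2.2.1.2.2.2.1, arg.2.2.1.2.2.2.2],
     [arg.2.2.2.1.1, arg.2.2.2.1.2.1, arg.2.2.2.1.2.2.1, arg.2.2.2.1.2.2.2.1, arg.2.2.2.1.2.2.2.2],
     [arg.2.2.2.2.1, arg.2.2.2.2.2.1, arg.2.2.2.2.2.2.1, arg.2.2.2.2.2.2.2.1, arg.2.2.2.2.2.2.2.2]]
  pvGridLoop rows []

-- ===== PORT B =====
-- B's set literal VALID (a Python set of the 25 valid letters)
def pvValidB : PySem.Set String := PySem.Set.ofList pvLettersA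

def e_chave_alt (arg : (String × String × String × String × String) × (String × String × String × String × String) × (String × String × String × String × String) × (String × String × String × String × String) × (String × String × String × String × String)) : Bool :=
  -- the two shape checks of Source B are identically true under the declared type
  let cells : List String :=
    [arg.1.1, arg.1.2.1, arg.1.2.2.1, arg.1.2.2.2.1, arg.1.2.2.2.2,
     arg.2.1.1, arg.2.1.2.1, arg.2.1.2.2.1, arg.2.1.2.2.2.1, arg.2.1.2.2.2.2,
     arg.2.2.1.1, arg.2.2.1.2.1, arg.2.2.1.2.2.1, arg.2.2.1.2.2.2.1, arg.2.2.1.2.2.2.2,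
     arg.2.2.2.1.1, arg.2.2.2.1.2.1, arg.2.2.2.1.2.2.1, arg.2.2.2.1.2.2.2.1, arg.2.2.2.1.2.2.2.2,
     arg.2.2.2.2.1, arg.2.2.2.2.2.1, arg.2.2.2.2.2.2.1, arg.2.2.2.2.2.2.2.1, arg.2.2.2.2.2.2.2.2]
  if cells.all (fun c => PySem.Set.contains pvValidB c) then
    PySem.Set.len (PySem.Set.ofList cells) == 25
  else
    false

-- ===== PRECONDITION & SPEC =====
def Spec_e_chave (arg : (String × String × String × String × String) × (String × String × String × String × String) × (String × String × String × String × String) × (String × String × String × String × String) × (String × String × String × String × String)) (out : Bool) : Prop := out = e_chave_alt arg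
instance (arg : (String × String × String × String × String) × (String × String × String × String × String) × (String × String × String × String × String) × (String × String × String × String × String) × (String × String × String × String × String)) (out : Bool) : Decidable (Spec_e_chave arg out) := by unfold Spec_e_chave; infer_instance

-- ===== CLAIM (what is proved, stated in full; the proofs are below) =====
def Claim_equal_e_chave : Prop := ∀ (arg : (String × String × String × String × String) × (String × String × String × String × String) × (String × String × String × String × String) × (String × String × String × String × String) × (String × String × String × String × String)), Dom_e_chave arg → Spec_e_chave arg (e_chave arg)

-- ===== LEMMAS AND PROOFS =====

theorem pvRowLoop_eq (cs : List String) : ∀ (letras : List String), letras.Nodup →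
    pvRowLoop cs letras =
      if (∀ c ∈ cs, pvLettersA.contains c = true) ∧ (letras ++ cs).Nodup
      then some (letras ++ cs) else none := by
  induction cs with
  | nil => intro letras h; simp [pvRowLoop, h]
  | cons c rest ih =>
    intro letras h
    by_cases hc : pvLettersA.contains c = true
    · by_cases hm : c ∈ letras
      · have hg : (pvLettersA.contains c && !letras.contains c) = false := by
          rw [List.contains_iff_mem.mpr hm]
          simp
        have hnot : ¬ ((∀ x ∈ c :: rest, pvLettersA.contains x = true) ∧ (letras ++ c :: rest).Nodup) := by
          rintro ⟨-, h2⟩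
          exact (List.disjoint_of_nodup_append h2) hm (List.mem_cons_self)
        rw [pvRowLoop, if_neg (by rw [hg]; simp), if_neg hnot]
      · have hb : letras.contains c = false := by
          rw [Bool.eq_false_iff]
          intro hct
          exact hm (List.contains_iff_mem.mp hct)
        have hg : (pvLettersA.contains c && !letras.contains c) = true := by
          rw [hc, hb]
          rfl
        have hnd : (letras ++ [c]).Nodup :=
          List.Nodup.append h (List.nodup_singleton c) (List.disjoint_singleton.mpr hm)
        have hA : letras ++ [c] ++ rest = letras ++ c :: rest := by simp
        rw [pvRowLoop, if_pos hg, ih _ hnd]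
        have heq : ((∀ x ∈ rest, pvLettersA.contains x = true) ∧ (letras ++ [c] ++ rest).Nodup)
            ↔ ((∀ x ∈ c :: rest, pvLettersA.contains x = true) ∧ (letras ++ c :: rest).Nodup) := by
          rw [hA]
          constructor
          · rintro ⟨h1, h2⟩
            refine ⟨?_, h2⟩
            intro x hx
            rcases List.mem_cons.mp hx with hx | hx
            · exact hx ▸ hc
            · exact h1 x hx
          · rintro ⟨h1, h2⟩
            exact ⟨fun x hx => h1 x (List.mem_cons_of_mem _ hx), h2⟩
        by_cases hcond : (∀ x ∈ c :: rest, pvLettersA.contains x = true) ∧ (letras ++ c :: rest).Nodup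
        · rw [if_pos (heq.mpr hcond), if_pos hcond, hA]
        · rw [if_neg (fun hh => hcond (heq.mp hh)), if_neg hcond]
    · have hg : (pvLettersA.contains c && !letras.contains c) = false := by
        have hcf : pvLettersA.contains c = false := by
          rw [Bool.eq_false_iff]; exact hc
        rw [hcf]
        rfl
      have hnot : ¬ ((∀ x ∈ c :: rest, pvLettersA.contains x = true) ∧ (letras ++ c :: rest).Nodup) := by
        rintro ⟨h1, -⟩
        exact hc (h1 c List.mem_cons_self)
      rw [pvRowLoop, if_neg (by rw [hg]; simp), if_neg hnot]

theorem pvGridLoop_eq (rows : List (List String)) : ∀ (letras : List String), letras.Nodup →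
    pvGridLoop rows letras =
      decide ((∀ c ∈ rows.flatten, pvLettersA.contains c = true) ∧ (letras ++ rows.flatten).Nodup) := by
  induction rows with
  | nil => intro letras h; simp [pvGridLoop, h]
  | cons r rs ih =>
    intro letras h
    rw [pvGridLoop, pvRowLoop_eq r letras h]
    by_cases hcond : (∀ c ∈ r, pvLettersA.contains c = true) ∧ (letras ++ r).Nodup
    · rw [if_pos hcond]
      have heq : ((∀ c ∈ rs.flatten, pvLettersA.contains c = true) ∧ (letras ++ r ++ rs.flatten).Nodup)
          ↔ ((∀ c ∈ (r :: rs).flatten, pvLettersA.contains c = true) ∧ (letras ++ (r :: rs).flatten).Nodup) := by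
        rw [List.flatten_cons, ← List.append_assoc]
        constructor
        · rintro ⟨h1, h2⟩
          refine ⟨?_, h2⟩
          intro c hcm
          rcases List.mem_append.mp hcm with hcm | hcm
          · exact hcond.1 c hcm
          · exact h1 c hcm
        · rintro ⟨h1, h2⟩
          exact ⟨fun c hcm => h1 c (List.mem_append.mpr (Or.inr hcm)), h2⟩
      exact (ih _ hcond.2).trans (decide_eq_decide.mpr heq)
    · rw [if_neg hcond]
      have hnot : ¬ ((∀ c ∈ (r :: rs).flatten, pvLettersA.contains c = true) ∧ (letras ++ (r :: rs).flatten).Nodup) := by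
        rintro ⟨h1, h2⟩
        apply hcond
        refine ⟨fun c hcm => h1 c (by rw [List.flatten_cons]; exact List.mem_append.mpr (Or.inl hcm)), ?_⟩
        rw [List.flatten_cons, ← List.append_assoc] at h2
        rcases List.nodup_append.mp h2 with ⟨h3, -, -⟩
        exact h3
      rw [decide_eq_false hnot]

theorem pv_add_len_le (s : List String) (x : String) :
    (PySem.Set.add s x).length ≤ s.length + 1 := by
  unfold PySem.Set.add
  split <;> simp

theorem pv_foldl_add_len_le (xs : List String) : ∀ (s : List String),
    (xs.foldl PySem.Set.add s).length ≤ s.length + xs.length := by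
  induction xs with
  | nil => intro s; simp
  | cons x xs ih =>
    intro s
    have h1 := ih (PySem.Set.add s x)
    have h2 := pv_add_len_le s x
    rw [List.foldl_cons]
    rw [List.length_cons]
    omega

theorem pv_foldl_add_len_iff (xs : List String) : ∀ (s : List String), s.Nodup →
    ((xs.foldl PySem.Set.add s).length = s.length + xs.length ↔ (s ++ xs).Nodup) := by
  induction xs with
  | nil =>
    intro s h
    rw [List.foldl_nil, List.append_nil, List.length_nil, Nat.add_zero]
    exact iff_of_true rfl h
  | cons x xs ih =>
    intro s h
    by_cases hm : x ∈ s
    · have hadd : PySem.Set.add s x = s := by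
        unfold PySem.Set.add
        simp [PySem.Set.contains, List.contains_iff_mem, hm]
      rw [List.foldl_cons, hadd]
      constructor
      · intro hlen
        exfalso
        have hle := pv_foldl_add_len_le xs s
        rw [List.length_cons] at hlen
        omega
      · intro hnd
        exfalso
        exact (List.disjoint_of_nodup_append hnd) hm List.mem_cons_self
    · have hadd : PySem.Set.add s x = s ++ [x] := by
        unfold PySem.Set.add
        simp [PySem.Set.contains, List.contains_iff_mem, hm]
      have hnd : (s ++ [x]).Nodup :=
        List.Nodup.append h (List.nodup_singleton x) (List.disjoint_singleton.mpr hm)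
      have hL : (s ++ [x]).length + xs.length = s.length + (x :: xs).length := by
        simp only [List.length_append, List.length_cons, List.length_nil]
        omega
      have hA : s ++ [x] ++ xs = s ++ x :: xs := by simp
      rw [List.foldl_cons, hadd, ← hL, ih _ hnd, hA]

theorem pv_ofList_len_iff (xs : List String) :
    (PySem.Set.ofList xs).length = xs.length ↔ xs.Nodup := by
  rw [PySem.Set.ofList_eq_foldl]
  have := pv_foldl_add_len_iff xs [] List.nodup_nil
  simpa using this

theorem pv_containsB (c : String) :
    PySem.Set.contains pvValidB c = pvLettersA.contains c := by
  by_cases h : c ∈ pvLettersA <;>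
    simp [pvValidB, PySem.Set.contains_eq_listContains, List.contains_iff_mem,
      PySem.Set.mem_ofList, h]

-- ===== VERDICT (by name: the statement is the Claim_ definition above) =====
theorem e_chave_spec : Claim_equal_e_chave := by
  intro arg _
  unfold Spec_e_chave
  obtain ⟨⟨a1, a2, a3, a4, a5⟩, ⟨b1, b2, b3, b4, b5⟩, ⟨c1, c2, c3, c4, c5⟩,
    ⟨d1, d2, d3, d4, d5⟩, ⟨e1, e2, e3, e4, e5⟩⟩ := arg
  show pvGridLoop _ [] = _
  rw [pvGridLoop_eq _ [] List.nodup_nil]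
  simp only [e_chave_alt]
  set cells : List String := [a1,a2,a3,a4,a5,b1,b2,b3,b4,b5,c1,c2,c3,c4,c5,d1,d2,d3,d4,d5,e1,e2,e3,e4,e5] with hcells
  have hflat : ([[a1,a2,a3,a4,a5],[b1,b2,b3,b4,b5],[c1,c2,c3,c4,c5],[d1,d2,d3,d4,d5],[e1,e2,e3,e4,e5]] : List (List String)).flatten = cells := by
    simp [hcells]
  rw [hflat]
  have hlen : cells.length = 25 := by simp [hcells]
  have hnilapp : ([] : List String) ++ cells = cells := by simp
  rw [hnilapp]
  by_cases hv : ∀ c ∈ cells, pvLettersA.contains c = true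
  · have hall : cells.all (fun c => PySem.Set.contains pvValidB c) = true := by
      rw [List.all_eq_true]
      intro c hcm
      rw [pv_containsB]
      exact hv c hcm
    rw [if_pos hall]
    by_cases hnd : cells.Nodup
    · have h25 : (PySem.Set.ofList cells).length = 25 := by
        rw [← hlen]; exact (pv_ofList_len_iff cells).mpr hnd
      have hB : (PySem.Set.len (PySem.Set.ofList cells) == (25 : Int)) = true := by
        unfold PySem.Set.len
        rw [h25]
        decide
      rw [hB]
      exact decide_eq_true ⟨hv, hnd⟩
    · have h25 : (PySem.Set.ofList cells).length ≠ 25 := fun hh =>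
        hnd ((pv_ofList_len_iff cells).mp (by rw [hh, hlen]))
      have hB : (PySem.Set.len (PySem.Set.ofList cells) == (25 : Int)) = false := by
        rw [beq_eq_false_iff_ne]
        intro hEq
        apply h25
        unfold PySem.Set.len at hEq
        exact_mod_cast hEq
      rw [hB]
      exact decide_eq_false (fun hh => hnd hh.2)
  · have hall : cells.all (fun c => PySem.Set.contains pvValidB c) = false := by
      rw [Bool.eq_false_iff]
      intro hta
      apply hv
      intro c hcm
      rw [← pv_containsB]
      exact List.all_eq_true.mp hta c hcm
    rw [if_neg (by rw [hall]; simp)]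
    exact decide_eq_false (fun hh => hv hh.1)
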